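-- pv_equiv track=rewrite | github.com/surafel58/A2SV-progress-sheet | Maximum Product of Word Lengths.py | maxProduct
-- ===== SOURCE A (Python) =====
-- from typing import List
--
-- def maxProduct(words: List[str]) -> int:
--
--     bin_words = []
--     maxProduct = 0
--
--     #record the letter occurence as binary number
--     for i in range(len(words)):
--
--         bin_word = 0
--
--         for char in words[i]:
--             bin_word |= 1 << (ord(char) - 97)
--
--         bin_words.append(bin_word)
--
--     for i in range(len(words)):
--         for j in range(i + 1, len(words)):
--             if not (bin_words[i] & bin_words[j]):
--                 maxProduct = max(maxProduct, (len(words[i]) * len(words[j])))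
--
--     return maxProduct
-- ===== SOURCE B (Python) =====
-- from typing import List
--
-- def maxProduct(words: List[str]) -> int:
--     # collapse words to a mask -> max-length table, then scan pairs of distinct table entries
--     best = {}
--     for w in words:
--         m = 0
--         for ch in w:
--             m |= 1 << (ord(ch) - 97)
--         best[m] = max(best.get(m, 0), len(w))
--     ans = 0
--     rest = list(best.items())
--     while rest:
--         m1, l1 = rest.pop(0)
--         for m2, l2 in rest:
--             if m1 & m2 == 0:
--                 ans = max(ans, l1 * l2)
--     return ans
-- ===== Notes on version B (the rewrite author's own statement) =====
-- stated objective: faster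
-- what changed: Instead of scanning all index pairs of the word list, B first collapses the words into a dict mapping each letter mask to the maximum length among words with that mask, then scans pairs of the deduplicated (mask, maxlen) table entries only.
import Mathlib
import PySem

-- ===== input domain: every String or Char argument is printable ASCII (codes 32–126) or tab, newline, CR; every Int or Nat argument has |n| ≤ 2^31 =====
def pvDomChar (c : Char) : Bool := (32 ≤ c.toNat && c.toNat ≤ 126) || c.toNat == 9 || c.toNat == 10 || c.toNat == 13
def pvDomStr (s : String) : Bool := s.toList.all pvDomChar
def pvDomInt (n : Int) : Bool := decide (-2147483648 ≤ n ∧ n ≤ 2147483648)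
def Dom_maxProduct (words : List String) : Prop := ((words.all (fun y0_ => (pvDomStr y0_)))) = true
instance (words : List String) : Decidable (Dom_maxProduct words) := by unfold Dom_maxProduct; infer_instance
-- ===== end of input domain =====

-- B replaces A's scan over all index pairs of the word list by a dict mapping each letter mask to the
-- maximum word length for that mask, then scans pairs of the deduplicated table entries (objective: faster).

-- ===== PORT A =====
-- the inner 'for char in …: bin_word |= 1 << (ord(char) - 97)' loop (shared by both sources verbatim);
-- 'ord(char) - 97' is Nat subtraction here: on Pre_ every char code is ≥ 97, exactly where Python does not raise
def pvMask (w : String) : Nat :=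
  w.toList.foldl (fun b c => b ||| (1 <<< (c.toNat - 97))) 0

def maxProduct (words : List String) : Int :=
  let bin_words : List Nat :=
    (PySem.List.pyRange 0 (PySem.List.len words)).foldl
      (fun acc i => acc ++ [pvMask (PySem.List.pyGetD words i "")]) []
  (PySem.List.pyRange 0 (PySem.List.len words)).foldl
    (fun mp i =>
      (PySem.List.pyRange (i + 1) (PySem.List.len words)).foldl
        (fun mp j =>
          if PySem.List.pyGetD bin_words i 0 &&& PySem.List.pyGetD bin_words j 0 = 0 then
            max mp (PySem.Str.len (PySem.List.pyGetD words i "") *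
                    PySem.Str.len (PySem.List.pyGetD words j ""))
          else mp)
        mp)
    0

-- ===== PORT B =====
-- the 'while rest: m1, l1 = rest.pop(0); for m2, l2 in rest: …' loop of Source B
def pvPairLoop : List (Nat × Int) → Int → Int
  | [], ans => ans
  | (m1, l1) :: rest, ans =>
    pvPairLoop rest
      (rest.foldl (fun a y => if m1 &&& y.1 = 0 then max a (l1 * y.2) else a) ans)

def maxProduct_alt (words : List String) : Int :=
  let best : PySem.Dict Nat Int :=
    words.foldl (fun d w =>
      let m := pvMask w
      d.insert m (max (d.getD m 0) (PySem.Str.len w))) PySem.Dict.empty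
  pvPairLoop best.items 0

-- ===== PRECONDITION & SPEC =====
-- Python's '1 << (ord(char) - 97)' raises ValueError (negative shift) for any character below 'a' (code 97),
-- so A returns normally exactly when every character of every word has code ≥ 97; B raises there too.
def Pre_maxProduct (words : List String) : Prop :=
  (words.all (fun w => w.toList.all (fun c => decide (97 ≤ c.toNat)))) = true
instance (words : List String) : Decidable (Pre_maxProduct words) := by
  unfold Pre_maxProduct; infer_instance

def pvWitness_maxProduct : List String := (["ab", "c"])

def Spec_maxProduct (words : List String) (out : Int) : Prop := out = maxProduct_alt words
instance (words : List String) (out : Int) : Decidable (Spec_maxProduct words out) := by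
  unfold Spec_maxProduct; infer_instance

-- ===== CLAIM (what is proved, stated in full; the proofs are below) =====
def Claim_equal_maxProduct : Prop :=
  ∀ (words : List String), Dom_maxProduct words → Pre_maxProduct words →
    Spec_maxProduct words (maxProduct words)

-- ===== LEMMAS AND PROOFS =====

-- the word list projected to (mask, length) entries
def pvEntries (words : List String) : List (Nat × Int) :=
  words.map (fun w => (pvMask w, PySem.Str.len w))

-- the dict-building step of B, zeta-reduced
def pvStep (d : PySem.Dict Nat Int) (w : String) : PySem.Dict Nat Int :=
  d.insert (pvMask w) (max (d.getD (pvMask w) 0) (PySem.Str.len w))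

def pvItems (words : List String) : List (Nat × Int) :=
  (words.foldl pvStep PySem.Dict.empty).items

lemma pvLen_nonneg (w : String) : 0 ≤ PySem.Str.len w := by
  simp [PySem.Str.len_eq]

lemma pvMask_aux (cs : List Char) (b : Nat)
    (h : cs.foldl (fun b c => b ||| (1 <<< (c.toNat - 97))) b = 0) : b = 0 ∧ cs = [] := by
  induction cs generalizing b with
  | nil => exact ⟨h, rfl⟩
  | cons c cs ih =>
    obtain ⟨h1, -⟩ := ih _ h
    dsimp only at h1
    rw [Nat.shiftLeft_eq, Nat.or_comm] at h1
    have hb := congrArg (fun n => n.testBit (c.toNat - 97)) h1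
    simp at hb

lemma pvMask_eq_zero {w : String} (h : pvMask w = 0) : PySem.Str.len w = 0 := by
  have := pvMask_aux w.toList 0 h
  simp [PySem.Str.len_eq, this.2]

-- ---- bridging A's indexed double loop to pvPairLoop over pvEntries ----

lemma pvBinwords_eq (words : List String) :
    (PySem.List.pyRange 0 (PySem.List.len words)).foldl
      (fun acc i => acc ++ [pvMask (PySem.List.pyGetD words i "")]) []
      = words.map pvMask := by
  rw [PySem.List.foldl_append_singleton_eq_map]
  have h1 : (PySem.List.pyRange 0 (PySem.List.len words)).map
      (fun i => pvMask (PySem.List.pyGetD words i "")) =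
      ((PySem.List.pyRange 0 (PySem.List.len words)).map
        (fun j => PySem.List.pyGetD words j "")).map pvMask := by
    rw [List.map_map]; rfl
  rw [List.nil_append, h1, PySem.List.map_pyGetD_pyRange_zero]

lemma pvLoopA_aux (words : List String) :
    ∀ (t k : Nat) (a : Int), words.length - k = t →
    (PySem.List.pyRange (k : Int) (PySem.List.len words)).foldl
      (fun mp i =>
        (PySem.List.pyRange (i + 1) (PySem.List.len words)).foldl
          (fun mp j =>
            if PySem.List.pyGetD (words.map pvMask) i 0 &&&
               PySem.List.pyGetD (words.map pvMask) j 0 = 0 then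
              max mp (PySem.Str.len (PySem.List.pyGetD words i "") *
                      PySem.Str.len (PySem.List.pyGetD words j ""))
            else mp)
          mp)
      a
      = pvPairLoop (pvEntries (words.drop k)) a := by
  intro t
  induction t with
  | zero =>
    intro k a hk
    have hk' : words.length ≤ k := by omega
    rw [PySem.List.pyRange_one_eq_nil (by simp [PySem.List.len_eq]; exact_mod_cast hk')]
    rw [List.drop_eq_nil_of_le hk']
    simp [pvEntries, pvPairLoop]
  | succ t ih =>
    intro k a hk
    have hklt : k < words.length := by omega
    have hmlen : k < (words.map pvMask).length := by simpa using hklt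
    rw [PySem.List.pyRange_one_cons (by simp [PySem.List.len_eq]; exact_mod_cast hklt)]
    rw [List.foldl_cons]
    -- rewrite the head-index lookups
    have hW : PySem.List.pyGetD words (k : Int) "" = words[k] := by
      rw [PySem.List.pyGetD_natCast, List.getD_eq_getElem _ _ hklt]
    have hM : PySem.List.pyGetD (words.map pvMask) (k : Int) 0 = pvMask words[k] := by
      rw [PySem.List.pyGetD_natCast, List.getD_eq_getElem _ _ hmlen]
      simp
    -- the inner fold at i = k
    have hinner :
        (PySem.List.pyRange ((k : Int) + 1) (PySem.List.len words)).foldl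
          (fun mp j =>
            if PySem.List.pyGetD (words.map pvMask) (k : Int) 0 &&&
               PySem.List.pyGetD (words.map pvMask) j 0 = 0 then
              max mp (PySem.Str.len (PySem.List.pyGetD words (k : Int) "") *
                      PySem.Str.len (PySem.List.pyGetD words j ""))
            else mp)
          a
        = (words.drop (k + 1)).foldl
            (fun mp w =>
              if pvMask words[k] &&& pvMask w = 0 then
                max mp (PySem.Str.len words[k] * PySem.Str.len w)
              else mp)
            a := by
      rw [PySem.List.foldl_congr_mem
        (g := fun mp j =>
          (fun mp (w : String) =>
            if pvMask words[k] &&& pvMask w = 0 then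
              max mp (PySem.Str.len words[k] * PySem.Str.len w)
            else mp) mp (PySem.List.pyGetD words j ""))]
      · have := PySem.List.foldl_pyRange_pyGetD words ""
          (fun mp (w : String) =>
            if pvMask words[k] &&& pvMask w = 0 then
              max mp (PySem.Str.len words[k] * PySem.Str.len w)
            else mp) a (a := (k : Int) + 1) (by positivity)
        rw [this]
        norm_num
      · intro acc j hj
        rw [PySem.List.mem_pyRange_one] at hj
        have hj0 : 0 ≤ j := by omega
        have hjlt : j < (words.length : Int) := by
          have := hj.2; simpa [PySem.List.len_eq] using this
        have hjW : PySem.List.pyGetD words j "" = words[j.toNat] := by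
          rw [PySem.List.pyGetD_eq_getElem words "" hj0 hjlt]
        have hjM : PySem.List.pyGetD (words.map pvMask) j 0 = pvMask words[j.toNat] := by
          rw [PySem.List.pyGetD_eq_getElem (words.map pvMask) 0 hj0 (by simpa using hjlt)]
          simp
        simp only [hjW, hjM, hW, hM]
    rw [hinner]
    -- cast the remaining outer range start and apply IH
    have hcast : (k : Int) + 1 = ((k + 1 : Nat) : Int) := by push_cast; ring
    rw [hcast, ih (k + 1) _ (by omega)]
    -- identify the two sides through drop k = words[k] :: drop (k+1)
    rw [List.drop_eq_getElem_cons hklt]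
    simp only [pvEntries, List.map_cons, pvPairLoop, List.foldl_map]

lemma pvA_eq (words : List String) :
    maxProduct words = pvPairLoop (pvEntries words) 0 := by
  unfold maxProduct
  simp only [pvBinwords_eq]
  have := pvLoopA_aux words words.length 0 0 (by omega)
  simpa using this

-- ---- the dict built by B ----

lemma pvAlt_eq (words : List String) :
    maxProduct_alt words = pvPairLoop (pvItems words) 0 := rfl

lemma pvBuild_getD (ws : List String) :
    ∀ (d : PySem.Dict Nat Int) (m : Nat),
      (ws.foldl pvStep d).getD m 0
        = (ws.filter (fun w => pvMask w == m)).foldl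
            (fun a w => max a (PySem.Str.len w)) (d.getD m 0) := by
  induction ws with
  | nil => intro d m; simp
  | cons w ws ih =>
    intro d m
    simp only [List.foldl_cons, List.filter_cons]
    by_cases h : pvMask w = m
    · simp only [h, beq_self_eq_true, if_true, List.foldl_cons, ih]
      rw [pvStep, PySem.Dict.getD_insert, h]
      simp
    · have hb : (pvMask w == m) = false := by simp [h]
      simp only [hb, ih]
      rw [pvStep, PySem.Dict.getD_insert]
      simp [Ne.symm h]

lemma pvBuild_keys (ws : List String) :
    (ws.foldl pvStep PySem.Dict.empty).keys = PySem.Set.ofList (ws.map pvMask) := by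
  have := PySem.Dict.keys_foldl_insert_key ws pvMask
    (fun d w => max (d.getD (pvMask w) 0) (PySem.Str.len w)) PySem.Dict.empty
  simpa [PySem.Dict.keys_empty, PySem.Set.update_nil_left] using this

lemma pvBuild_nodup (ws : List String) :
    (ws.foldl pvStep PySem.Dict.empty).keys.Nodup :=
  PySem.Dict.nodup_keys_foldl_insert_key ws pvMask
    (fun d w => max (d.getD (pvMask w) 0) (PySem.Str.len w)) PySem.Dict.empty
    PySem.Dict.nodup_keys_empty

lemma pvItems_char (words : List String) :
    pvItems words = (PySem.Set.ofList (words.map pvMask)).map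
      (fun m => (m, (words.foldl pvStep PySem.Dict.empty).getD m 0)) := by
  rw [pvItems, PySem.Dict.items_eq_map_keys _ (pvBuild_nodup words) 0, pvBuild_keys]

lemma pvItems_fst_nodup (words : List String) :
    ((pvItems words).map Prod.fst).Nodup := by
  rw [pvItems_char, List.map_map]
  have : (Prod.fst ∘ fun m => (m, (words.foldl pvStep PySem.Dict.empty).getD m 0))
      = fun m => m := rfl
  rw [this]
  simp only [List.map_id']
  exact PySem.Set.nodup_ofList (words.map pvMask)

-- every item entry's value is attained by some word with that mask, and bounds all of them
lemma pvItems_attained (words : List String) :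
    ∀ p ∈ pvItems words, ∃ w ∈ words, pvMask w = p.1 ∧ PySem.Str.len w = p.2 := by
  rw [pvItems_char]
  intro p hp
  rw [List.mem_map] at hp
  obtain ⟨m, hm, rfl⟩ := hp
  rw [PySem.Set.mem_ofList, List.mem_map] at hm
  obtain ⟨w0, hw0, hw0m⟩ := hm
  have hG := pvBuild_getD words PySem.Dict.empty m
  rw [PySem.Dict.getD_empty] at hG
  set l := words.filter (fun w => pvMask w == m) with hl
  have hw0l : w0 ∈ l := by
    rw [hl, List.mem_filter]
    exact ⟨hw0, by simp [hw0m]⟩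
  have hmap : l.foldl (fun a w => max a (PySem.Str.len w)) 0
      = (l.map PySem.Str.len).foldl max 0 := by rw [List.foldl_map]
  rcases PySem.List.foldl_max_mem (l.map PySem.Str.len) 0 with h0 | hmem
  · -- the max is 0; w0's length is squeezed to 0
    have hle := (PySem.List.le_foldl_max_int l PySem.Str.len 0).2 w0 hw0l
    rw [hG, hmap, h0] at *
    refine ⟨w0, hw0, hw0m, ?_⟩
    have := pvLen_nonneg w0
    omega
  · rw [List.mem_map] at hmem
    obtain ⟨w1, hw1l, hw1⟩ := hmem
    have hw1w : w1 ∈ words := (List.mem_filter.1 (hl ▸ hw1l)).1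
    have hw1m : pvMask w1 = m := by
      have := (List.mem_filter.1 (hl ▸ hw1l)).2
      simpa using this
    exact ⟨w1, hw1w, hw1m, by rw [hG, hmap, hw1]⟩

lemma pvItems_bound (words : List String) :
    ∀ w ∈ words, ∃ M, (pvMask w, M) ∈ pvItems words ∧ PySem.Str.len w ≤ M := by
  intro w hw
  refine ⟨(words.foldl pvStep PySem.Dict.empty).getD (pvMask w) 0, ?_, ?_⟩
  · rw [pvItems_char, List.mem_map]
    exact ⟨pvMask w, by rw [PySem.Set.mem_ofList, List.mem_map]; exact ⟨w, hw, rfl⟩, rfl⟩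
  · have hG := pvBuild_getD words PySem.Dict.empty (pvMask w)
    rw [PySem.Dict.getD_empty] at hG
    rw [hG]
    exact (PySem.List.le_foldl_max_int _ PySem.Str.len 0).2 w
      (List.mem_filter.2 ⟨hw, by simp⟩)

-- ---- order-free characterization of pvPairLoop ----

lemma pvInner_ge (m1 : Nat) (l1 : Int) :
    ∀ (r : List (Nat × Int)) (a : Int),
      a ≤ r.foldl (fun a y => if m1 &&& y.1 = 0 then max a (l1 * y.2) else a) a := by
  intro r
  induction r with
  | nil => intro a; simp
  | cons z r ih =>
    intro a
    rw [List.foldl_cons]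
    refine le_trans ?_ (ih _)
    split <;> simp

lemma pvInner_elem (m1 : Nat) (l1 : Int) :
    ∀ (r : List (Nat × Int)) (a : Int) (y : Nat × Int), y ∈ r → m1 &&& y.1 = 0 →
      l1 * y.2 ≤ r.foldl (fun a y => if m1 &&& y.1 = 0 then max a (l1 * y.2) else a) a := by
  intro r
  induction r with
  | nil => intro a y hy; simp at hy
  | cons z r ih =>
    intro a y hy hd
    rw [List.foldl_cons]
    rcases List.mem_cons.1 hy with rfl | hy'
    · refine le_trans ?_ (pvInner_ge m1 l1 r _)
      simp [hd]
    · exact ih _ y hy' hd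

lemma pvInner_le (m1 : Nat) (l1 : Int) :
    ∀ (r : List (Nat × Int)) (a bnd : Int), a ≤ bnd →
      (∀ y ∈ r, m1 &&& y.1 = 0 → l1 * y.2 ≤ bnd) →
      r.foldl (fun a y => if m1 &&& y.1 = 0 then max a (l1 * y.2) else a) a ≤ bnd := by
  intro r
  induction r with
  | nil => intro a bnd ha _; simpa using ha
  | cons z r ih =>
    intro a bnd ha hall
    rw [List.foldl_cons]
    refine ih _ bnd ?_ (fun y hy => hall y (List.mem_cons_of_mem _ hy))
    split
    next h => exact max_le ha (hall z (by simp) h)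
    next => exact ha

lemma pvPairLoop_ge : ∀ (L : List (Nat × Int)) (a : Int), a ≤ pvPairLoop L a := by
  intro L
  induction L with
  | nil => intro a; simp [pvPairLoop]
  | cons z r ih =>
    intro a
    obtain ⟨m1, l1⟩ := z
    exact le_trans (pvInner_ge m1 l1 r a) (ih _)

lemma pvPairLoop_elem :
    ∀ (L : List (Nat × Int)) (a : Int) (x y : Nat × Int),
      [x, y].Sublist L → x.1 &&& y.1 = 0 → x.2 * y.2 ≤ pvPairLoop L a := by
  intro L
  induction L with
  | nil => intro a x y h; simp at h
  | cons z r ih =>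
    intro a x y h hd
    rcases List.sublist_cons_iff.1 h with h' | ⟨l', heq, hsub⟩
    · obtain ⟨m1, l1⟩ := z
      exact ih _ x y h' hd
    · have hxz : x = z := by injection heq
      have hl' : l' = [y] := by injection heq with _ h2; exact h2.symm
      subst hxz
      obtain ⟨m1, l1⟩ := x
      rw [hl'] at hsub
      have hy : y ∈ r := List.singleton_sublist.1 hsub
      refine le_trans (pvInner_elem m1 l1 r a y hy hd) (pvPairLoop_ge r _)

lemma pvPairLoop_le :
    ∀ (L : List (Nat × Int)) (a bnd : Int), a ≤ bnd →
      (∀ x y : Nat × Int, [x, y].Sublist L → x.1 &&& y.1 = 0 → x.2 * y.2 ≤ bnd) →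
      pvPairLoop L a ≤ bnd := by
  intro L
  induction L with
  | nil => intro a bnd ha _; simpa [pvPairLoop] using ha
  | cons z r ih =>
    intro a bnd ha hall
    obtain ⟨m1, l1⟩ := z
    refine ih _ bnd ?_ (fun x y hs hd => hall x y (hs.cons _) hd)
    refine pvInner_le m1 l1 r a bnd ha ?_
    intro y hy hd
    exact hall (m1, l1) y ((List.singleton_sublist.2 hy).cons₂ _) hd

lemma pvMem_mem_ne_sublist :
    ∀ (L : List (Nat × Int)) (x y : Nat × Int), x ∈ L → y ∈ L → x.1 ≠ y.1 →
      [x, y].Sublist L ∨ [y, x].Sublist L := by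
  intro L
  induction L with
  | nil => intro x y hx; simp at hx
  | cons z r ih =>
    intro x y hx hy hne
    rcases List.mem_cons.1 hx with rfl | hx'
    · rcases List.mem_cons.1 hy with rfl | hy'
      · exact absurd rfl hne
      · exact Or.inl ((List.singleton_sublist.2 hy').cons₂ _)
    · rcases List.mem_cons.1 hy with rfl | hy'
      · exact Or.inr ((List.singleton_sublist.2 hx').cons₂ _)
      · exact (ih x y hx' hy' hne).imp (·.cons _) (·.cons _)

lemma pvPair_fst_ne {L : List (Nat × Int)} {x y : Nat × Int}
    (h : [x, y].Sublist L) (hnd : (L.map Prod.fst).Nodup) : x.1 ≠ y.1 := by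
  have := (h.map Prod.fst).nodup hnd
  simp only [List.map_cons, List.map_nil, List.nodup_cons, List.mem_singleton] at this
  exact this.1

-- ---- the main equality ----

lemma pvMain (words : List String) :
    pvPairLoop (pvEntries words) 0 = pvPairLoop (pvItems words) 0 := by
  apply le_antisymm
  · refine pvPairLoop_le _ 0 _ (pvPairLoop_ge _ 0) ?_
    intro x y hsub hd
    have hx : x ∈ pvEntries words := hsub.subset (by simp)
    have hy : y ∈ pvEntries words := hsub.subset (by simp)
    rw [pvEntries, List.mem_map] at hx hy
    obtain ⟨w1, hw1, hx_eq⟩ := hx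
    obtain ⟨w2, hw2, hy_eq⟩ := hy
    subst hx_eq; subst hy_eq
    dsimp only at hd ⊢
    by_cases hfe : pvMask w1 = pvMask w2
    · have hm : pvMask w1 = 0 := by
        rw [hfe] at hd ⊢
        simpa using hd
      rw [pvMask_eq_zero hm, zero_mul]
      exact pvPairLoop_ge _ 0
    · obtain ⟨M1, hM1mem, hM1ge⟩ := pvItems_bound words w1 hw1
      obtain ⟨M2, hM2mem, hM2ge⟩ := pvItems_bound words w2 hw2
      have hM1nn : 0 ≤ M1 := le_trans (pvLen_nonneg w1) hM1ge
      have hprod : PySem.Str.len w1 * PySem.Str.len w2 ≤ M1 * M2 :=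
        mul_le_mul hM1ge hM2ge (pvLen_nonneg w2) hM1nn
      rcases pvMem_mem_ne_sublist (pvItems words) (pvMask w1, M1) (pvMask w2, M2)
        hM1mem hM2mem (by simpa using hfe) with hs | hs
      · exact le_trans hprod (pvPairLoop_elem _ 0 _ _ hs (by simpa using hd))
      · refine le_trans hprod ?_
        rw [mul_comm]
        exact pvPairLoop_elem _ 0 _ _ hs (by simpa [Nat.and_comm] using hd)
  · refine pvPairLoop_le _ 0 _ (pvPairLoop_ge _ 0) ?_
    intro x y hsub hd
    have hx : x ∈ pvItems words := hsub.subset (by simp)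
    have hy : y ∈ pvItems words := hsub.subset (by simp)
    obtain ⟨w1, hw1, hw1m, hw1l⟩ := pvItems_attained words x hx
    obtain ⟨w2, hw2, hw2m, hw2l⟩ := pvItems_attained words y hy
    have hne : x.1 ≠ y.1 := pvPair_fst_ne hsub (pvItems_fst_nodup words)
    have hxE : x ∈ pvEntries words := by
      rw [pvEntries, List.mem_map]
      exact ⟨w1, hw1, by rw [hw1m, hw1l]⟩
    have hyE : y ∈ pvEntries words := by
      rw [pvEntries, List.mem_map]
      exact ⟨w2, hw2, by rw [hw2m, hw2l]⟩
    rcases pvMem_mem_ne_sublist (pvEntries words) x y hxE hyE hne with hs | hs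
    · exact pvPairLoop_elem _ 0 x y hs hd
    · rw [mul_comm]
      exact pvPairLoop_elem _ 0 y x hs (by rwa [Nat.and_comm])

-- ===== VERDICT (by name: the statement is the Claim_ definition above) =====
theorem maxProduct_spec : Claim_equal_maxProduct := by
  intro words _ _
  unfold Spec_maxProduct
  rw [pvA_eq, pvAlt_eq, pvMain]
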